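-- pv_equiv track=rewrite | github.com/calinstapinu/Fp | lab 1 /pr3,b.py | longest_prim
-- ===== SOURCE A (Python) =====
-- def isprime(n):
--     if n <= 1:                              #daca n este 1 din start spunem ca nu este prim
--         return False
--
--     if n <= 3:                              #daca n este mai mic egal cu 3 spunem ca este prim deoarece 2 este prim si 3 este prim
--         return True
--
--     if n % 2 == 0 or n % 3 == 0:             #daca n este divizibil cu 2 sau 3, in caz afirmativ N nu este prim deoarece numerele divizibile cu 2 si 3 nu sunt prime
--         return False
--
--     i = 5                                    #indexam i cu valoarea 5 deoarece am verificat cazurile precedente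
--     while i * i <= n:                        # programul ruleaza pana la radicalul lui N
--         if n % i == 0 or n % (i + 2) == 0:   #daca numarul N este divizibi cu i sau i+2, in caz afirmativ returnam False
--             return False
--         i += 6                               #crestem valoarea lui i cu 6,  (de ce 6?) deoarece precedent am verificat toti multiplii de 2 si 3,
--                                              #deci nu are rost sa o facem din nou
--     return True                              #daca cele din if nu au loc, returnam True
--
-- def longest_prim(vector):
--     max_l=0                                    #definim 4 contoare
--     max_start_ind=-1
--     current_l=0
--     current_ind=-1
--
--     for i in range(len(vector)):                 # Aceast for parcurge vectorul și verifica pentru fiecare element dacă este prim folosind funcția isprime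
--         if isprime(vector[i]):
--             current_l += 1                       #daca elementul este prim, contorul nostru curent creste
--             if current_ind == -1:                #daca indexul contorului este -1 atunci indexul devine pozitia curenta a elementului prim gasit adica i
--               current_ind = i
--         else:                                    # in cazul in care elementul gasit nu este numar prim verificam daca contorul curent este mai mare decat contorul maxim
--             if current_l > max_l:
--                 max_l = current_l                # in caz afirmativ, contorul maxim ia valoarea contorului curent
--                 max_start_ind = current_ind      # si indexul maxim ia valoarea indexului curent i
--             current_l = 0                        # la final resetam contoarele curente si bucla se repeta
--             current_ind = -1
--
--     if current_l > max_l: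
--         max_l = current_l
--         max_start_ind = current_ind
--
--     if max_start_ind >= 0:                      #verificam daca secventa maxima este mai mare decat 0 , in caz afirmativ returnam secventa
--         return vector[max_start_ind:max_start_ind + max_l]
--     else:
--         return None                             #in caz negativ returnam None
-- ===== SOURCE B (Python) =====
-- def isprime(n):
--     if n <= 1:
--         return False
--     if n <= 3:
--         return True
--     if n % 2 == 0 or n % 3 == 0:
--         return False
--     i = 5
--     while i * i <= n:
--         if n % i == 0 or n % (i + 2) == 0:
--             return False
--         i += 6
--     return True
--
--
-- def prime_runs(vector):
--     """Decompose vector into its maximal runs of primes, as (start, length) pairs."""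
--     runs = []
--     n = len(vector)
--     i = 0
--     while i < n:
--         if isprime(vector[i]):
--             j = i
--             while j < n and isprime(vector[j]):
--                 j += 1
--             runs.append((i, j - i))
--             i = j
--         else:
--             i += 1
--     return runs
--
--
-- def longest_prim(vector):
--     # build all maximal prime runs, then select the first strictly longest one
--     best = None
--     for s, l in prime_runs(vector):
--         if best is None or l > best[1]:
--             best = (s, l)
--     if best is None:
--         return None
--     return vector[best[0]:best[0] + best[1]]
-- ===== Notes on version B (the rewrite author's own statement) =====
-- stated objective: alternative
-- what changed: Replaces A's single stateful pass with four running counters and flush logic by a build-runs-then-select decomposition: first compute all maximal prime runs as (start, length) pairs, then pick the first strictly longest run and slice it out.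
import Mathlib
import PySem

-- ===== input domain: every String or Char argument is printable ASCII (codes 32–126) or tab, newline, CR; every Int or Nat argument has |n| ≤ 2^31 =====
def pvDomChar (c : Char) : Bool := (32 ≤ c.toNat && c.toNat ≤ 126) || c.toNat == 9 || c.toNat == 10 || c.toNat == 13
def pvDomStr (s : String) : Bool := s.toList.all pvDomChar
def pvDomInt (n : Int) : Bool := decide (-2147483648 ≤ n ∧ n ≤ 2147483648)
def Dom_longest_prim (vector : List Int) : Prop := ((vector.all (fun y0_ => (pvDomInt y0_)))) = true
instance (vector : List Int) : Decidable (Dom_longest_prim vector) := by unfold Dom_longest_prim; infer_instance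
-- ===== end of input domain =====

-- B replaces A's stateful running-counter-with-flush pass by a build-all-prime-runs-then-select-first-longest
-- decomposition (objective: alternative; same asymptotic cost).

-- ===== PORT A =====
-- the 'while i * i <= n: ... i += 6' loop of isprime
def isprimeLoop (n i : Int) : Bool :=
  if _h : i * i ≤ n then
    if n % i == 0 || n % (i + 2) == 0 then false
    else isprimeLoop n (i + 6)
  else true
termination_by (n + 1 - i).toNat
decreasing_by
  have h2 : i ≤ n := by nlinarith [sq_nonneg (i - 1), sq_nonneg i]
  omega

-- isprime(n); divisors 2, 3, i, i+2 are positive here, where Int '%' agrees with Python's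
def isprime (n : Int) : Bool :=
  if n ≤ 1 then false
  else if n ≤ 3 then true
  else if n % 2 == 0 || n % 3 == 0 then false
  else isprimeLoop n 5

-- the 'if current_l > max_l: ...' update, used in the loop's else branch and after the loop
def flushA (st : Int × Int × Int × Int) : Int × Int :=
  match st with
  | (max_l, max_start_ind, current_l, current_ind) =>
    if current_l > max_l then (current_l, current_ind) else (max_l, max_start_ind)

-- the body of A's 'for i in range(len(vector))' loop
def stepA (vector : List Int) (st : Int × Int × Int × Int) (i : Int) : Int × Int × Int × Int :=
  match st with
  | (max_l, max_start_ind, current_l, current_ind) =>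
    if isprime (PySem.List.pyGetD vector i 0) then
      (max_l, max_start_ind, current_l + 1, if current_ind == -1 then i else current_ind)
    else
      let m := flushA (max_l, max_start_ind, current_l, current_ind)
      (m.1, m.2, 0, -1)

def longest_prim (vector : List Int) : Option (List Int) :=
  let st := (PySem.List.pyRange 0 (vector.length : Int) 1).foldl (stepA vector) (0, -1, 0, -1)
  let m := flushA st
  if m.2 ≥ 0 then some (PySem.List.slice vector (some m.2) (some (m.2 + m.1))) else none

-- ===== PORT B =====
-- the 'while j < n and isprime(vector[j]): j += 1' scan of Source B's prime_runs
def scanRun (v : List Int) (j : Nat) : Nat :=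
  if _h : j < v.length then
    if isprime (v.getD j 0) then scanRun v (j + 1) else j
  else j
termination_by v.length - j

theorem scanRun_ge (v : List Int) (j : Nat) : j ≤ scanRun v j := by
  fun_induction scanRun v j <;> omega

theorem scanRun_gt (v : List Int) (j : Nat) (h : j < v.length)
    (hp : isprime (v.getD j 0) = true) : j < scanRun v j := by
  rw [scanRun, dif_pos h, if_pos hp]
  have := scanRun_ge v (j + 1); omega

-- prime_runs(vector): the outer 'while i < n' loop, with the accumulated runs list as state
def primeRunsAcc (v : List Int) (i : Nat) (runs : List (Nat × Nat)) : List (Nat × Nat) :=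
  if h : i < v.length then
    if hp : isprime (v.getD i 0) = true then
      primeRunsAcc v (scanRun v i) (runs ++ [(i, scanRun v i - i)])
    else primeRunsAcc v (i + 1) runs
  else runs
termination_by v.length - i
decreasing_by
  · have := scanRun_gt v i h hp; omega
  · omega

-- the body of Source B's selection loop over the runs
def chooseB (best : Option (Nat × Nat)) (r : Nat × Nat) : Option (Nat × Nat) :=
  match best with
  | none => some r
  | some b => if r.2 > b.2 then some r else some b

def longest_prim_alt (vector : List Int) : Option (List Int) :=
  match (primeRunsAcc vector 0 []).foldl chooseB none with
  | none => none
  | some (s, l) => some (PySem.List.slice vector (some (s : Int)) (some ((s : Int) + (l : Int))))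

-- ===== PRECONDITION & SPEC =====
def Spec_longest_prim (vector : List Int) (out : Option (List Int)) : Prop := out = longest_prim_alt vector
instance (vector : List Int) (out : Option (List Int)) : Decidable (Spec_longest_prim vector out) := by unfold Spec_longest_prim; infer_instance

-- ===== CLAIM (what is proved, stated in full; the proofs are below) =====
def Claim_equal_longest_prim : Prop := ∀ (vector : List Int), Dom_longest_prim vector → Spec_longest_prim vector (longest_prim vector)

-- ===== LEMMAS AND PROOFS =====

-- reference (non-accumulator) form of prime-run decomposition, used only in the proofs
def primeRuns (v : List Int) (i : Nat) : List (Nat × Nat) :=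
  if h : i < v.length then
    if hp : isprime (v.getD i 0) = true then
      (i, scanRun v i - i) :: primeRuns v (scanRun v i)
    else primeRuns v (i + 1)
  else []
termination_by v.length - i
decreasing_by
  · have := scanRun_gt v i h hp; omega
  · omega

def castRuns (runs : List (Nat × Nat)) : List (Int × Int) :=
  runs.map (fun p => ((p.1 : Int), (p.2 : Int)))

-- the current (possibly still open) run prepended / merged onto the runs of the rest
def mergedRuns (cl ci : Int) (i : Nat) : List (Nat × Nat) → List (Int × Int)
  | [] => if 0 < cl then [(ci, cl)] else []
  | (s, l) :: r =>
      if 0 < cl then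
        (if s = i then (ci, cl + (l : Int)) :: castRuns r
         else (ci, cl) :: castRuns ((s, l) :: r))
      else castRuns ((s, l) :: r)

-- selection over (start, len) candidates, state (best_len, best_start)
def sel2 (p : Int × Int) (rs : List (Int × Int)) : Int × Int :=
  rs.foldl (fun b r => if r.2 > b.1 then (r.2, r.1) else b) p

def corr : Option (Nat × Nat) → Int × Int
  | none => (0, -1)
  | some (s, l) => ((l : Int), (s : Int))

theorem sel2_cons (p : Int × Int) (r : Int × Int) (rs : List (Int × Int)) :
    sel2 p (r :: rs) = sel2 (if r.2 > p.1 then (r.2, r.1) else p) rs := by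
  simp [sel2, List.foldl]

theorem primeRuns_start_ge (v : List Int) (i : Nat) :
    ∀ p ∈ primeRuns v i, i ≤ p.1 := by
  fun_induction primeRuns v i with
  | case1 i h hp ih =>
      intro p hm
      rcases List.mem_cons.mp hm with h1 | h1
      · subst h1; simp
      · have := ih p h1
        have := scanRun_ge v i
        omega
  | case2 i h hp ih =>
      intro p hm; have := ih p hm; omega
  | case3 i h => intro p hm; simp at hm

theorem primeRuns_len_pos (v : List Int) (i : Nat) :
    ∀ p ∈ primeRuns v i, 0 < p.2 := by
  fun_induction primeRuns v i with
  | case1 i h hp ih =>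
      intro p hm
      rcases List.mem_cons.mp hm with h1 | h1
      · subst h1; have := scanRun_gt v i h hp; simp; omega
      · exact ih p h1
  | case2 i h hp ih => exact ih
  | case3 i h => intro p hm; simp at hm

theorem scanRun_succ (v : List Int) (i : Nat) (h : i < v.length)
    (hp : isprime (v.getD i 0) = true) : scanRun v i = scanRun v (i + 1) := by
  rw [scanRun, dif_pos h, if_pos hp]

theorem primeRuns_cons (v : List Int) (i : Nat) (h : i < v.length)
    (hp : isprime (v.getD i 0) = true) :
    primeRuns v i = (i, scanRun v i - i) :: primeRuns v (scanRun v i) := by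
  rw [primeRuns, dif_pos h, dif_pos hp]

theorem primeRuns_notprime (v : List Int) (i : Nat) (h : i < v.length)
    (hp : isprime (v.getD i 0) = false) :
    primeRuns v i = primeRuns v (i + 1) := by
  rw [primeRuns, dif_pos h, dif_neg (by rw [hp]; simp)]

theorem primeRuns_nil (v : List Int) (i : Nat) (h : ¬ i < v.length) :
    primeRuns v i = [] := by
  rw [primeRuns]; simp [h]

theorem primeRunsAcc_eq (v : List Int) (i : Nat) : ∀ (acc : List (Nat × Nat)),
    primeRunsAcc v i acc = acc ++ primeRuns v i := by
  fun_induction primeRuns v i with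
  | case1 i h hp ih =>
      intro acc
      rw [primeRunsAcc, dif_pos h, dif_pos hp, ih]
      simp
  | case2 i h hp ih =>
      intro acc
      rw [primeRunsAcc, dif_pos h, dif_neg hp, ih]
  | case3 i h =>
      intro acc
      rw [primeRunsAcc, dif_neg h, List.append_nil]

-- after a prime at i, merging the extended open run is the same as merging the old one
theorem mergedRuns_nonpos (ci : Int) (i : Nat) (runs : List (Nat × Nat)) :
    mergedRuns 0 ci i runs = castRuns runs := by
  cases runs <;> simp [mergedRuns, castRuns]

theorem merged_step (v : List Int) (i : Nat) (cl ci : Int) (hi : i < v.length)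
    (hp : isprime (v.getD i 0) = true) (hcl : 0 ≤ cl) (hcle : cl ≤ (i : Int))
    (hci : 0 < cl → ci = (i : Int) - cl) (hci0 : cl = 0 → ci = -1) :
    mergedRuns (cl + 1) (if ci == -1 then (i : Int) else ci) (i + 1) (primeRuns v (i + 1))
      = mergedRuns cl ci i (primeRuns v i) := by
  have hgt : i < scanRun v i := scanRun_gt v i hi hp
  have hss : scanRun v i = scanRun v (i + 1) := scanRun_succ v i hi hp
  rw [primeRuns_cons v i hi hp]
  by_cases h2 : i + 1 < v.length ∧ isprime (v.getD (i + 1) 0) = true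
  · obtain ⟨h2a, h2b⟩ := h2
    have hgt2 : i + 1 < scanRun v (i + 1) := scanRun_gt v (i + 1) h2a h2b
    rw [primeRuns_cons v (i + 1) h2a h2b, ← hss]
    rcases eq_or_lt_of_le hcl with hcl0 | hclpos
    · have hcieq : ci = -1 := hci0 hcl0.symm
      simp only [mergedRuns, hcieq, castRuns, ← hcl0]
      norm_num
      omega
    · have hcieq : ci = (i : Int) - cl := hci hclpos
      have hcine : ¬ ci = -1 := by omega
      simp only [mergedRuns, beq_iff_eq, if_neg hcine, if_pos hclpos,
        if_pos (show (0:Int) < cl + 1 by omega)]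
      norm_num
      omega
  · have hj1 : scanRun v (i + 1) = i + 1 := by
      rw [scanRun]
      by_cases hl : i + 1 < v.length
      · rw [dif_pos hl, if_neg]
        intro hc; exact h2 ⟨hl, hc⟩
      · rw [dif_neg hl]
    have hj' : scanRun v i = i + 1 := by rw [hss, hj1]
    have hstarts : ∀ p ∈ primeRuns v (i + 1), i + 1 < p.1 := by
      by_cases hl : i + 1 < v.length
      · have hnp : isprime (v.getD (i + 1) 0) = false := by
          cases hb : isprime (v.getD (i + 1) 0)
          · rfl
          · exact absurd ⟨hl, hb⟩ h2
        rw [primeRuns_notprime v (i + 1) hl hnp]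
        intro p hm; have := primeRuns_start_ge v (i + 2) p hm; omega
      · rw [primeRuns_nil v (i + 1) hl]; simp
    rw [hj']
    have hlen1 : i + 1 - i = 1 := by omega
    rw [hlen1]
    rcases eq_or_lt_of_le hcl with hcl0 | hclpos
    · have hcieq : ci = -1 := hci0 hcl0.symm
      cases hrs : primeRuns v (i + 1) with
      | nil => simp [mergedRuns, hcieq, castRuns, ← hcl0]
      | cons p r =>
        obtain ⟨s, l⟩ := p
        have hs : ¬ s = i + 1 := by
          have := hstarts (s, l) (by rw [hrs]; simp); omega
        simp [mergedRuns, hcieq, castRuns, ← hcl0, hs]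
    · have hcieq : ci = (i : Int) - cl := hci hclpos
      have hcine : ¬ ci = -1 := by omega
      cases hrs : primeRuns v (i + 1) with
      | nil =>
        simp only [mergedRuns, beq_iff_eq, if_neg hcine,
          if_pos (show (0:Int) < cl + 1 by omega), if_pos hclpos, castRuns]
        norm_num
      | cons p r =>
        obtain ⟨s, l⟩ := p
        have hs : ¬ s = i + 1 := by
          have := hstarts (s, l) (by rw [hrs]; simp); omega
        simp only [mergedRuns, beq_iff_eq, if_neg hcine,
          if_pos (show (0:Int) < cl + 1 by omega), if_pos hclpos, if_neg hs, castRuns]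
        norm_num

theorem mainL (v : List Int) (k : Nat) : ∀ (i : Nat) (ml ms cl ci : Int),
    i ≤ v.length → v.length - i = k → 0 ≤ ml → 0 ≤ cl → cl ≤ (i : Int) →
    (0 < cl → ci = (i : Int) - cl) → (cl = 0 → ci = -1) →
    flushA ((PySem.List.pyRange (i : Int) (v.length : Int) 1).foldl (stepA v) (ml, ms, cl, ci))
      = sel2 (ml, ms) (mergedRuns cl ci i (primeRuns v i)) := by
  induction k with
  | zero =>
    intro i ml ms cl ci hle hk hml hcl hcle hci hci0
    rw [PySem.List.pyRange_one_eq_nil (by exact_mod_cast (show v.length ≤ i by omega))]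
    rw [List.foldl_nil, primeRuns_nil v i (by omega)]
    rcases eq_or_lt_of_le hcl with hcl0 | hclpos
    · simp [mergedRuns, ← hcl0, sel2, flushA, show ¬ (0:Int) > ml by omega]
    · simp [mergedRuns, hclpos, sel2, flushA]
  | succ k ih =>
    intro i ml ms cl ci hle hk hml hcl hcle hci hci0
    have hi : i < v.length := by omega
    rw [PySem.List.pyRange_one_cons (by exact_mod_cast hi), List.foldl_cons]
    have hget : PySem.List.pyGetD v (i : Int) 0 = v.getD i 0 := PySem.List.pyGetD_natCast v i 0
    have hcast : (i : Int) + 1 = ((i + 1 : Nat) : Int) := by push_cast; ring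
    by_cases hp : isprime (v.getD i 0) = true
    · have hp2 : isprime (v[i]?.getD 0) = true := by
        rwa [List.getD_eq_getElem?_getD] at hp
      have hstep : stepA v (ml, ms, cl, ci) (i : Int)
          = (ml, ms, cl + 1, if ci == -1 then (i : Int) else ci) := by
        simp [stepA, hget, hp2]
      rw [hstep, hcast]
      rw [ih (i + 1) ml ms (cl + 1) (if ci == -1 then (i : Int) else ci)
        (by omega) (by omega) hml (by omega) (by push_cast; omega)
        (by
          intro _
          by_cases hc0 : ci = -1
          · have : cl = 0 := by
              by_contra hne
              have := hci (by omega); omega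
            simp [hc0]; omega
          · have hclp : 0 < cl := by
              by_contra hne
              have := hci0 (by omega); omega
            have := hci hclp
            simp [beq_iff_eq, hc0]
            omega)
        (by omega)]
      rw [merged_step v i cl ci hi hp hcl hcle hci hci0]
    · have hpf : isprime (v.getD i 0) = false := by
        cases hb : isprime (v.getD i 0)
        · rfl
        · exact absurd hb hp
      have hpf2 : isprime (v[i]?.getD 0) = false := by
        rwa [List.getD_eq_getElem?_getD] at hpf
      have hstep : stepA v (ml, ms, cl, ci) (i : Int)
          = ((flushA (ml, ms, cl, ci)).1, (flushA (ml, ms, cl, ci)).2, 0, -1) := by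
        simp [stepA, hget, hpf2]
      rw [hstep, hcast]
      have hf1 : 0 ≤ (flushA (ml, ms, cl, ci)).1 := by
        simp only [flushA]; split_ifs <;> omega
      rw [ih (i + 1) (flushA (ml, ms, cl, ci)).1 (flushA (ml, ms, cl, ci)).2 0 (-1)
        (by omega) (by omega) hf1 le_rfl (by positivity)
        (by omega) (fun _ => rfl)]
      rw [mergedRuns_nonpos, primeRuns_notprime v i hi hpf]
      rcases eq_or_lt_of_le hcl with hcl0 | hclpos
      · rw [← hcl0, mergedRuns_nonpos]
        have hfe : flushA (ml, ms, 0, ci) = (ml, ms) := by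
          simp [flushA, show ¬ (0:Int) > ml by omega]
        rw [hfe]
      · have hstarts : ∀ p ∈ primeRuns v (i + 1), i < p.1 := fun p hm => by
          have := primeRuns_start_ge v (i + 1) p hm; omega
        cases hrs : primeRuns v (i + 1) with
        | nil =>
          simp only [mergedRuns, if_pos hclpos, castRuns, List.map_nil]
          rw [sel2_cons]
          simp only [sel2, List.foldl_nil]
          rw [Prod.mk.eta]; rfl
        | cons p r =>
          obtain ⟨s, l⟩ := p
          have hs : ¬ s = i := by
            have := hstarts (s, l) (by rw [hrs]; simp); omega
          simp only [mergedRuns, if_pos hclpos, if_neg hs]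
          rw [sel2_cons]
          congr 1

theorem selEquiv (runs : List (Nat × Nat)) : ∀ (b : Option (Nat × Nat)),
    (∀ p ∈ runs, 0 < p.2) →
    sel2 (corr b) (castRuns runs) = corr (runs.foldl chooseB b) := by
  induction runs with
  | nil => intro b _; simp [castRuns, sel2]
  | cons r rs ih =>
    intro b hr
    obtain ⟨s, l⟩ := r
    have hl : 0 < l := hr (s, l) (by simp)
    have hrest : ∀ p ∈ rs, 0 < p.2 := fun p hp => hr p (List.mem_cons_of_mem _ hp)
    have hcr : castRuns ((s, l) :: rs) = ((s : Int), (l : Int)) :: castRuns rs := by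
      simp [castRuns]
    cases b with
    | none =>
      rw [hcr, sel2_cons, if_pos (by simp only [corr]; omega)]
      simpa [chooseB, corr] using ih (some (s, l)) hrest
    | some q =>
      obtain ⟨bs, bl⟩ := q
      rw [hcr, sel2_cons]
      by_cases hc : bl < l
      · rw [if_pos (by simp only [corr]; omega)]
        have hstep : List.foldl chooseB (some (bs, bl)) ((s, l) :: rs)
            = List.foldl chooseB (some (s, l)) rs := by
          simp [chooseB, hc]
        rw [hstep]
        exact ih (some (s, l)) hrest
      · rw [if_neg (by simp only [corr]; omega)]
        have hstep : List.foldl chooseB (some (bs, bl)) ((s, l) :: rs)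
            = List.foldl chooseB (some (bs, bl)) rs := by
          simp [chooseB, hc]
        rw [hstep]
        exact ih (some (bs, bl)) hrest

-- ===== VERDICT (by name: the statement is the Claim_ definition above) =====
theorem longest_prim_spec : Claim_equal_longest_prim := by
  intro v _
  unfold Spec_longest_prim
  have h0 := mainL v v.length 0 0 (-1) 0 (-1) (by omega) (by omega) le_rfl le_rfl
    (by norm_num) (by omega) (fun _ => rfl)
  simp only [Nat.cast_zero] at h0
  have h1 := selEquiv (primeRuns v 0) none (primeRuns_len_pos v 0)
  rw [show corr none = ((0 : Int), (-1 : Int)) from rfl] at h1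
  have h2 : primeRunsAcc v 0 [] = primeRuns v 0 := by
    rw [primeRunsAcc_eq, List.nil_append]
  simp only [longest_prim, longest_prim_alt, h0, mergedRuns_nonpos, h1, h2]
  cases hbest : (primeRuns v 0).foldl chooseB none with
  | none => simp [corr]
  | some p =>
    obtain ⟨s, l⟩ := p
    simp [corr, show ((s : Int)) ≥ 0 by positivity]
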